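-- pv_equiv track=rewrite | github.com/Rikuma2329/Python_lecture | Shiritori/4-1.py | start_check
-- ===== SOURCE A (Python) =====
-- def start_check(wordlist):
--     count = {}
--     for i in range(97, 123):        #アルファベット（A~Z）を辞書のキーに設定
--         count[chr(i)] = 0
--     for i in range(0, len(wordlist)):       #wordlistから各アルファベットで始まる単語がいくつあるかを調べる
--         for key in (wordlist[i])[:1]:
--             if key in count:
--                 count[key] += 1
--
--     return(count)
-- ===== SOURCE B (Python) =====
-- def start_check(wordlist):
--     # Iterate over the alphabet, rescanning the words per letter, instead of
--     # one accumulating pass over the words.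
--     return {chr(i): sum(1 for w in wordlist if w[:1] == chr(i))
--             for i in range(97, 123)}
-- ===== Notes on version B (the rewrite author's own statement) =====
-- stated objective: idiomatic
-- what changed: B builds the dict by a comprehension over the 26 letters, counting for each letter how many words start with it, instead of A's initialise-then-accumulate pass over the words.
import Mathlib
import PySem

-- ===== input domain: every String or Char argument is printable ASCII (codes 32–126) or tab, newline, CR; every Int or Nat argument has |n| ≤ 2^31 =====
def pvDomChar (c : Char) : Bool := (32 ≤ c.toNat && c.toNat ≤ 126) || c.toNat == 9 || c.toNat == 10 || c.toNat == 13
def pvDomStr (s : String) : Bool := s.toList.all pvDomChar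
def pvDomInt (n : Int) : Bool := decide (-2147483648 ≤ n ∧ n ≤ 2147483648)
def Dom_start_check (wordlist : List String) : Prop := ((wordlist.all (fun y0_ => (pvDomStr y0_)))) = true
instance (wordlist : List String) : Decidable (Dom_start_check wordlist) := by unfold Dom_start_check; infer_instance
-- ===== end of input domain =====

-- B counts words per alphabet letter instead of A's one accumulating pass over the words (idiomatic; same return value).

-- ===== PORT A =====
def start_check (wordlist : List String) : List (String × Int) :=
  -- count = {}; for i in range(97, 123): count[chr(i)] = 0
  -- for i in range(0, len(wordlist)): for key in (wordlist[i])[:1]: if key in count: count[key] += 1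
  -- return count   (iterating a str yields its 1-char strings; 'count[key] += 1' is get-then-overwrite-in-place)
  ((PySem.List.pyRange 0 (wordlist.length : Int) 1).foldl
      (fun d i =>
        (PySem.Str.slice (PySem.List.pyGetD wordlist i "") none (some 1)).toList.foldl
          (fun d ch =>
            if d.contains (String.ofList [ch]) then
              d.insert (String.ofList [ch]) (d.getD (String.ofList [ch]) 0 + 1)
            else d) d)
      ((PySem.List.pyRange 97 123 1).foldl
        (fun d i => d.insert (String.ofList [Char.ofNat i.toNat]) 0) PySem.Dict.empty)).items

-- ===== PORT B =====
def start_check_alt (wordlist : List String) : List (String × Int) :=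
  -- {chr(i): sum(1 for w in wordlist if w[:1] == chr(i)) for i in range(97, 123)}
  (PySem.List.pyRange 97 123 1).map (fun i =>
    (String.ofList [Char.ofNat i.toNat],
      wordlist.foldl
        (fun acc w => if PySem.Str.slice w none (some 1) == String.ofList [Char.ofNat i.toNat] then acc + 1 else acc)
        (0 : Int)))

-- ===== PRECONDITION & SPEC =====
def Spec_start_check (wordlist : List String) (out : List (String × Int)) : Prop := out = start_check_alt wordlist
instance (wordlist : List String) (out : List (String × Int)) : Decidable (Spec_start_check wordlist out) := by unfold Spec_start_check; infer_instance

-- ===== CLAIM (what is proved, stated in full; the proofs are below) =====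
def Claim_equal_start_check : Prop := ∀ (wordlist : List String), Dom_start_check wordlist → Spec_start_check wordlist (start_check wordlist)

-- ===== LEMMAS AND PROOFS =====

-- the 26 keys 'a'..'z' in insertion order
def pvLetters : List String := (PySem.List.pyRange 97 123 1).map (fun i => String.ofList [Char.ofNat i.toNat])

-- A's first loop builds exactly the zero table over pvLetters
theorem pv_init_eq :
    (PySem.List.pyRange 97 123 1).foldl
      (fun d i => d.insert (String.ofList [Char.ofNat i.toNat]) 0) PySem.Dict.empty
    = PySem.Dict.mk (pvLetters.map (fun s => (s, (0 : Int)))) := by decide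

-- get? on a value-table dict
theorem pv_get?_table (L : List String) (g : String → Int) (k : String) :
    (PySem.Dict.mk (L.map (fun s => (s, g s)))).get? k
    = if k ∈ L then some (g k) else none := by
  induction L with
  | nil => simp [PySem.Dict.get?]
  | cons a t ih =>
    simp only [List.map_cons, PySem.Dict.get?_mk_cons, ih]
    by_cases h : a = k
    · subst h; simp
    · simp [Ne.symm h, h, beq_iff_eq]

theorem pv_contains_table (L : List String) (g : String → Int) (k : String) :
    (PySem.Dict.mk (L.map (fun s => (s, g s)))).contains k = decide (k ∈ L) := by
  rw [PySem.Dict.contains_eq_isSome_get?, pv_get?_table]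
  by_cases h : k ∈ L <;> simp [h]

theorem pv_insert_table (L : List String) (g : String → Int) (k : String) (v : Int)
    (hk : k ∈ L) :
    (PySem.Dict.mk (L.map (fun s => (s, g s)))).insert k v
    = PySem.Dict.mk (L.map (fun s => (s, if s = k then v else g s))) := by
  apply PySem.Dict.ext
  rw [PySem.Dict.items_insert_of_contains]
  · rw [List.map_map]
    apply List.map_congr_left
    intro s _
    by_cases h : s = k
    · subst h; simp
    · simp [h, beq_iff_eq]
  · rw [pv_contains_table]; simpa using hk

-- one word's inner loop on a table
theorem pv_step_table (g : String → Int) (w : String) :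
    ((PySem.Str.slice w none (some 1)).toList.foldl
      (fun d ch =>
        if d.contains (String.ofList [ch]) then
          d.insert (String.ofList [ch]) (d.getD (String.ofList [ch]) 0 + 1)
        else d)
      (PySem.Dict.mk (pvLetters.map (fun s => (s, g s)))))
    = PySem.Dict.mk (pvLetters.map (fun s =>
        (s, g s + if PySem.Str.slice w none (some 1) == s then 1 else 0))) := by
  have htl : (PySem.Str.slice w none (some 1)).toList = w.toList.take 1 := by
    rw [PySem.Str.toList_slice]
    simp [PySem.Chars.slice_eq_listSlice]
    rw [show (1 : Int) = ((1 : Nat) : Int) from rfl, PySem.List.slice_to_natCast]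
  have hs : PySem.Str.slice w none (some 1) = String.ofList (w.toList.take 1) := by
    apply String.ext; rw [htl]; simp
  rw [htl]
  cases hw : w.toList with
  | nil =>
    simp only [List.take_nil, List.foldl_nil]
    congr 1
    apply List.map_congr_left
    intro s hsmem
    have hk : PySem.Str.slice w none (some 1) = String.ofList [] := by rw [hs, hw]; rfl
    rw [hk]
    have hne : (String.ofList ([] : List Char) == s) = false := by
      cases hss : String.ofList ([] : List Char) == s
      · rfl
      · exfalso
        have := eq_of_beq hss
        rw [← this] at hsmem
        revert hsmem; decide
    rw [hne]; simp
  | cons c rest =>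
    simp only [List.take_succ_cons, List.take_zero, List.foldl_cons, List.foldl_nil]
    have hk : PySem.Str.slice w none (some 1) = String.ofList [c] := by rw [hs, hw]; rfl
    by_cases hmem : String.ofList [c] ∈ pvLetters
    · rw [pv_contains_table]
      simp only [hmem, decide_true, if_true]
      have hget : (PySem.Dict.mk (pvLetters.map (fun s => (s, g s)))).getD (String.ofList [c]) 0
          = g (String.ofList [c]) := by
        rw [PySem.Dict.getD_eq_get?_getD, pv_get?_table]; simp [hmem]
      rw [hget, pv_insert_table _ _ _ _ hmem]
      congr 1
      apply List.map_congr_left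
      intro s _
      by_cases h : s = String.ofList [c]
      · subst h; simp [hk]
      · have : (PySem.Str.slice w none (some 1) == s) = false := by
          rw [hk]; simpa [beq_iff_eq] using fun h' => h h'.symm
        simp [h, this]
    · rw [pv_contains_table]
      simp only [hmem, decide_false, Bool.false_eq_true, if_false]
      congr 1
      apply List.map_congr_left
      intro s hsmem
      have : (PySem.Str.slice w none (some 1) == s) = false := by
        rw [hk]
        by_cases h : String.ofList [c] = s
        · exact absurd (h ▸ hsmem) hmem
        · simpa [beq_iff_eq] using h
      simp [this]

-- A's index loop over range(0, len(wordlist)) is a fold over the list itself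
theorem pv_outer_loop {β : Type} (xs : List String) (f : β → String → β) (init : β) :
    (PySem.List.pyRange 0 (xs.length : Int) 1).foldl
      (fun d i => f d (PySem.List.pyGetD xs i "")) init
    = xs.foldl f init := by
  rw [PySem.List.foldl_pyRange_zero_pyGetD']

-- the whole word loop on a table
theorem pv_fold_table (ws : List String) (g : String → Int) :
    (ws.foldl
      (fun d wrd =>
        (PySem.Str.slice wrd none (some 1)).toList.foldl
          (fun d ch =>
            if d.contains (String.ofList [ch]) then
              d.insert (String.ofList [ch]) (d.getD (String.ofList [ch]) 0 + 1)
            else d) d)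
      (PySem.Dict.mk (pvLetters.map (fun s => (s, g s)))))
    = PySem.Dict.mk (pvLetters.map (fun s =>
        (s, g s + (ws.countP (fun w => PySem.Str.slice w none (some 1) == s) : Int)))) := by
  induction ws generalizing g with
  | nil => simp
  | cons w rest ih =>
    simp only [List.foldl_cons]
    rw [pv_step_table g w, ih]
    congr 1
    apply List.map_congr_left
    intro s _
    simp only [List.countP_cons]
    by_cases h : (PySem.Str.slice w none (some 1) == s) = true <;> simp [h] <;> ring

-- ===== VERDICT (by name: the statement is the Claim_ definition above) =====
theorem start_check_spec : Claim_equal_start_check := by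
  intro wordlist _
  unfold Spec_start_check start_check start_check_alt
  rw [pv_init_eq]
  have hout := pv_outer_loop wordlist
    (fun d wrd =>
        (PySem.Str.slice wrd none (some 1)).toList.foldl
          (fun d ch =>
            if d.contains (String.ofList [ch]) then
              d.insert (String.ofList [ch]) (d.getD (String.ofList [ch]) 0 + 1)
            else d) d)
    (PySem.Dict.mk (pvLetters.map (fun s => (s, (0 : Int)))))
  rw [hout]
  rw [pv_fold_table wordlist (fun _ => 0)]
  simp only [pvLetters, List.map_map]
  apply List.map_congr_left
  intro i _
  simp only [Function.comp]
  rw [PySem.List.foldl_if_add_one]
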